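-- pv_equiv track=rewrite | github.com/MrBrantCode/unitest_baseline | mut_generate/mist_train_cf/cf_69549/solution.py | all_feasible_sequences
-- ===== SOURCE A (Python) =====
-- import itertools
--
-- def all_feasible_sequences(lst, target):
--     feasible_sequences = []
--     for r in range(1, len(lst)+1):
--         # Generate all combinations of r elements
--         combinations = list(itertools.combinations(lst, r))
--         # calculate product for each combination
--         for comb in combinations:
--             product = 1
--             for num in comb:
--                 product *= num
--             # if the product equals to target, then we found a feasible sequence
--             if product == target:
--                 feasible_sequences.append(comb)
--
--     return feasible_sequences
-- ===== SOURCE B (Python) =====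
-- def all_feasible_sequences(lst, target):
--     def go(rem, need, prod, path):
--         # chosen `path` has product `prod`; pick `need` more elements from `rem`
--         if need == 0:
--             return [path] if prod == target else []
--         if not rem:
--             return []
--         x = rem[0]
--         rest = rem[1:]
--         # include x first, then exclude it: matches combinations' lexicographic order
--         return go(rest, need - 1, prod * x, path + (x,)) + go(rest, need, prod, path)
--
--     out = []
--     for r in range(1, len(lst) + 1):
--         out += go(lst, r, 1, ())
--     return out
-- ===== Notes on version B (the rewrite author's own statement) =====
-- stated objective: alternative
-- what changed: Replaced itertools.combinations plus a per-combination product loop with a recursive include/exclude backtracking helper that threads the running product as an accumulator.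
import Mathlib
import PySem

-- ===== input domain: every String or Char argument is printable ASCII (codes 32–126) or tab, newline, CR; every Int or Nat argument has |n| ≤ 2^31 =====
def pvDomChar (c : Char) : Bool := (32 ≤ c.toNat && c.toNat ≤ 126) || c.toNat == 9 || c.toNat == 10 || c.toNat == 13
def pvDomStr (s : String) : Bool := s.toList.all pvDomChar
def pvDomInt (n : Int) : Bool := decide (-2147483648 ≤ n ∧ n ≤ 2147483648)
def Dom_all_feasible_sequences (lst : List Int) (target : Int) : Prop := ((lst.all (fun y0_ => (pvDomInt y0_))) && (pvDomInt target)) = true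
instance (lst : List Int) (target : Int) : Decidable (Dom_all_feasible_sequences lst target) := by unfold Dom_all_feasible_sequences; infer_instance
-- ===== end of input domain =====

-- B replaces itertools.combinations + per-combination product loops by recursive
-- include/exclude backtracking threading the running product (alternative decomposition, same results).


-- ===== PORT A =====
-- itertools.combinations(lst, r): r-element tuples in lexicographic index order
def pyCombinations : Nat → List Int → List (List Int)
  | 0, _ => [[]]
  | _ + 1, [] => []
  | r + 1, x :: xs => (pyCombinations r xs).map (fun c => x :: c) ++ pyCombinations (r + 1) xs

def all_feasible_sequences (lst : List Int) (target : Int) : List (List Int) :=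
  (PySem.List.pyRange 1 (lst.length + 1) 1).foldl
    (fun feasible_sequences r =>
      (pyCombinations r.toNat lst).foldl
        (fun fs comb =>
          let product := comb.foldl (fun product num => product * num) 1
          if product = target then fs ++ [comb] else fs)
        feasible_sequences)
    []

-- ===== PORT B =====
-- go rem need prod path: pick `need` more elements from `rem`, include-first then exclude
def altGo (target : Int) : List Int → Nat → Int → List Int → List (List Int)
  | _, 0, prod, path => if prod = target then [path] else []
  | [], _ + 1, _, _ => []
  | x :: rest, need + 1, prod, path =>
      altGo target rest need (prod * x) (path ++ [x]) ++ altGo target rest (need + 1) prod path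

def all_feasible_sequences_alt (lst : List Int) (target : Int) : List (List Int) :=
  (PySem.List.pyRange 1 (lst.length + 1) 1).foldl
    (fun out r => out ++ altGo target lst r.toNat 1 []) []

-- ===== PRECONDITION & SPEC =====
def Spec_all_feasible_sequences (lst : List Int) (target : Int) (out : List (List Int)) : Prop := out = all_feasible_sequences_alt lst target
instance (lst : List Int) (target : Int) (out : List (List Int)) : Decidable (Spec_all_feasible_sequences lst target out) := by unfold Spec_all_feasible_sequences; infer_instance

-- ===== CLAIM (what is proved, stated in full; the proofs are below) =====
def Claim_equal_all_feasible_sequences : Prop := ∀ (lst : List Int) (target : Int), Dom_all_feasible_sequences lst target → Spec_all_feasible_sequences lst target (all_feasible_sequences lst target)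

-- ===== LEMMAS AND PROOFS =====

theorem foldl_mul_one (c : List Int) (a : Int) :
    c.foldl (fun p n => p * n) a = a * c.foldl (fun p n => p * n) 1 := by
  induction c generalizing a with
  | nil => simp
  | cons x xs ih =>
    simp only [List.foldl]
    rw [ih (a * x), ih (1 * x)]
    ring

theorem altGo_eq (target : Int) (xs : List Int) : ∀ (need : Nat) (prod : Int) (path : List Int),
    altGo target xs need prod path =
      (pyCombinations need xs).filterMap
        (fun c => if prod * c.foldl (fun p n => p * n) 1 = target then some (path ++ c) else none) := by
  induction xs with
  | nil =>
    intro need prod path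
    cases need with
    | zero => simp [altGo, pyCombinations, List.filterMap_cons]; split <;> simp_all
    | succ n => simp [altGo, pyCombinations]
  | cons x rest ih =>
    intro need prod path
    cases need with
    | zero => simp [altGo, pyCombinations, List.filterMap_cons]; split <;> simp_all
    | succ n =>
      simp only [altGo, pyCombinations, List.filterMap_append, List.filterMap_map, ih]
      congr 1
      apply List.filterMap_congr
      intro c _
      simp only [Function.comp, List.foldl]
      rw [foldl_mul_one c (1 * x)]
      rw [show prod * (1 * x * c.foldl (fun p n => p * n) 1) = prod * x * c.foldl (fun p n => p * n) 1 by ring]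
      split <;> simp

theorem inner_loop_eq (target : Int) (l : List (List Int)) :
    ∀ (acc : List (List Int)),
      l.foldl (fun fs comb =>
          if comb.foldl (fun p n => p * n) 1 = target then fs ++ [comb] else fs) acc
        = acc ++ l.filterMap
            (fun c => if 1 * c.foldl (fun p n => p * n) 1 = target then some (([] : List Int) ++ c) else none) := by
  induction l with
  | nil => intro acc; simp
  | cons c cs ih =>
    intro acc
    simp only [List.foldl, List.filterMap_cons, one_mul, List.nil_append]
    by_cases h : c.foldl (fun p n => p * n) 1 = target <;> simp [h, ih]

-- ===== VERDICT (by name: the statement is the Claim_ definition above) =====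
theorem all_feasible_sequences_spec : Claim_equal_all_feasible_sequences := by
  intro lst target _
  unfold Spec_all_feasible_sequences all_feasible_sequences all_feasible_sequences_alt
  congr 1
  funext fs r
  rw [altGo_eq]
  exact inner_loop_eq target _ fs
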